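-- pv_equiv track=rewrite | github.com/teese/korbinian | korbinian/prot_list/prot_list.py | get_nonTM_seq_using_nested_TM_indices
-- ===== SOURCE A (Python) =====
-- def get_nonTM_seq_using_nested_TM_indices(s, t):
--     """Get the nonTM (EM) region of protein sequence based on nested tuple of TM indices.
--
--     Parameters
--     ----------
--     s : str
--         Full sequence to be sliced
--         e.g. 'MKLLRRAWRRRAALGLGTLALCGAALLYLARCAAEPGDPRAMSGRSPPPPAPARAAAFLAVLVA'
--     t : tuple
--         Nested tuple of TM regions
--         e.g. ((11, 30),)
--         IMPORTANT: Indexing is using UniProt style (1:3), not python style (0:3)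
--
--     Returns
--     -------
--     nonTMD_seq : str
--         Non-TMD sequence (all residues surrounding TMD)
--     """
--     TM01_start = t[0][0]
--     last_TMD_end = t[-1][1]
--     nonTMD_first = s[0: int(TM01_start) - 1]
--     nonTMD_seq = nonTMD_first
--     # only for multipass proteins, generate sequences between TMDs
--     if len(t) > 1:
--         for TM_Nr in range(len(t) - 1):
--             # the TMD is the equivalent item in the list
--             TMD = "TM{:02d}".format(TM_Nr + 1)
--             # the next TMD, which contains the end index, is the next item in the list
--             next_TMD = "TM{:02d}".format(TM_Nr + 2)
--
--             TM_start = t[TM_Nr][0]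
--             TM_end = t[TM_Nr][1]
--             next_TM_start = t[TM_Nr + 1][0]
--             next_TM_end = t[TM_Nr + 1][1]
--
--             between_TM_and_TMplus1 = s[TM_end: next_TM_start - 1]
--
--             nonTMD_seq += between_TM_and_TMplus1
--
--     # sequence from last TMD to C-term.
--     nonTMD_last = s[last_TMD_end:]
--     nonTMD_seq += nonTMD_last
--     return nonTMD_seq
-- ===== SOURCE B (Python) =====
-- def get_nonTM_seq_using_nested_TM_indices(s, t):
--     """Boundary-table rewrite: one flat list of cut indices, sliced pairwise."""
--     bounds = [0]
--     for start, end in t: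
--         bounds.extend((start - 1, end))
--     bounds.append(len(s))
--     return "".join(s[a:b] for a, b in zip(bounds[::2], bounds[1::2]))
-- ===== Notes on version B (the rewrite author's own statement) =====
-- stated objective: simpler
-- what changed: Replaces A's three special-cased phases (head slice, indexed loop over range(len(t)-1) with t[i]/t[i+1] lookups, tail slice) by one flat boundary table [0, start-1, end, ..., len(s)] sliced pairwise and joined.
import Mathlib
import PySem

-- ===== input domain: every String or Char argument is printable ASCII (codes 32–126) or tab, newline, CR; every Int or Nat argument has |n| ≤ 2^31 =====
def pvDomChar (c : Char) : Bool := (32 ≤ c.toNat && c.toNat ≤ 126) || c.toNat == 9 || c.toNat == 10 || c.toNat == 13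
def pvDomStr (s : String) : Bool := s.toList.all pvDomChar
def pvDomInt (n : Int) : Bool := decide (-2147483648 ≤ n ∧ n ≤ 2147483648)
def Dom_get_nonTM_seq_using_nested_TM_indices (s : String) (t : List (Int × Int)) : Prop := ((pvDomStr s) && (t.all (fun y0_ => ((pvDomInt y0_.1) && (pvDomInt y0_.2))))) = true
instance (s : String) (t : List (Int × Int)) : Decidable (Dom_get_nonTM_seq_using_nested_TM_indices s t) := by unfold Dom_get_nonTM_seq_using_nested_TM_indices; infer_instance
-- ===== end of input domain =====

-- B replaces A's first/middle/last special-casing by one flat boundary table sliced pairwise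
-- (same cost; objective: simpler).

-- ===== PORT A =====
-- literal transliteration of Source A: index t[0]/t[-1], slice the head, loop i in range(len(t)-1)
-- appending s[t[i][1] : t[i+1][0]-1], then append s[t[-1][1]:]. (int(TM01_start) is the identity
-- on the Int the tuple holds.)
def get_nonTM_seq_using_nested_TM_indices (s : String) (t : List (Int × Int)) : String :=
  match PySem.List.pyGet? t 0, PySem.List.pyGet? t (-1) with
  | some tm0, some tml =>
    let cs := s.toList
    let TM01_start : Int := tm0.1
    let last_TMD_end : Int := tml.2
    let nonTMD_first := PySem.List.slice cs (some 0) (some (TM01_start - 1))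
    let nonTMD_seq := nonTMD_first
    let nonTMD_seq :=
      if t.length > 1 then
        (PySem.List.pyRange 0 ((t.length : Int) - 1) 1).foldl
          (fun acc TM_Nr =>
            let TM_end := (PySem.List.pyGetD t TM_Nr (0, 0)).2
            let next_TM_start := (PySem.List.pyGetD t (TM_Nr + 1) (0, 0)).1
            let between_TM_and_TMplus1 := PySem.List.slice cs (some TM_end) (some (next_TM_start - 1))
            acc ++ between_TM_and_TMplus1)
          nonTMD_seq
      else nonTMD_seq
    let nonTMD_last := PySem.List.slice cs (some last_TMD_end) none
    String.ofList (nonTMD_seq ++ nonTMD_last)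
  | _, _ => ""   -- t = []: Python raises IndexError here; excluded by Pre_

-- ===== PORT B =====
-- Source B: bounds = [0] + [start-1, end for each pair] + [len(s)]; join s[a:b] over
-- zip(bounds[::2], bounds[1::2]). pvPairB is that zip of the even/odd strides.
def pvPairB (l : List Int) : List (Int × Int) :=
  match l with
  | a :: b :: rest => (a, b) :: pvPairB rest
  | _ => []

def get_nonTM_seq_using_nested_TM_indices_alt (s : String) (t : List (Int × Int)) : String :=
  let cs := s.toList
  let bounds : List Int :=
    0 :: t.foldr (fun p acc => (p.1 - 1) :: p.2 :: acc) [(cs.length : Int)]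
  String.ofList
    (PySem.Chars.join [] ((pvPairB bounds).map (fun p => PySem.List.slice cs (some p.1) (some p.2))))

-- ===== PRECONDITION & SPEC =====
-- Pre_ excludes only t = [], on which Python A raises IndexError at t[0].
def Pre_get_nonTM_seq_using_nested_TM_indices (s : String) (t : List (Int × Int)) : Prop := t ≠ []
instance (s : String) (t : List (Int × Int)) : Decidable (Pre_get_nonTM_seq_using_nested_TM_indices s t) := by unfold Pre_get_nonTM_seq_using_nested_TM_indices; infer_instance
def pvWitness_get_nonTM_seq_using_nested_TM_indices : String × (List (Int × Int)) := ("MKLLRRAW", [(2, 4)])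

def Spec_get_nonTM_seq_using_nested_TM_indices (s : String) (t : List (Int × Int)) (out : String) : Prop := out = get_nonTM_seq_using_nested_TM_indices_alt s t
instance (s : String) (t : List (Int × Int)) (out : String) : Decidable (Spec_get_nonTM_seq_using_nested_TM_indices s t out) := by unfold Spec_get_nonTM_seq_using_nested_TM_indices; infer_instance

-- ===== CLAIM (what is proved, stated in full; the proofs are below) =====
def Claim_equal_get_nonTM_seq_using_nested_TM_indices : Prop := ∀ (s : String) (t : List (Int × Int)), Dom_get_nonTM_seq_using_nested_TM_indices s t → Pre_get_nonTM_seq_using_nested_TM_indices s t → Spec_get_nonTM_seq_using_nested_TM_indices s t (get_nonTM_seq_using_nested_TM_indices s t)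

-- ===== LEMMAS AND PROOFS =====

-- the common shape both programs compute: for each consecutive pair a slice between the TMs,
-- then the slice from the last TM end to the C-terminus
def pvCore (cs : List Char) (e : Int) : List (Int × Int) → List Char
  | [] => PySem.List.slice cs (some e) (some (cs.length : Int))
  | (st, _en) :: rest => PySem.List.slice cs (some e) (some (st - 1)) ++ pvCore cs (((st, _en) : Int × Int).2) rest

lemma join_nil_eq_flatten (ps : List (List Char)) : PySem.Chars.join [] ps = ps.flatten := by
  simp [PySem.Chars.join, List.intercalate]
  induction ps with
  | nil => simp
  | cons p ps ih => cases ps <;> simp_all [List.intersperse]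

-- s[a:len(s)] = s[a:]  (Python clamps the stop at the length anyway)
lemma slice_to_length (cs : List Char) (a : Int) :
    PySem.List.slice cs (some a) (some (cs.length : Int)) = PySem.List.slice cs (some a) none := by
  simp [PySem.List.slice, PySem.List.clampIdx]
  split_ifs <;> omega

lemma pyGet?_zero_cons (p : Int × Int) (r : List (Int × Int)) :
    PySem.List.pyGet? (p :: r) 0 = some p := by
  simp [PySem.List.pyGet?, PySem.List.pyIdx?]

lemma pyGet?_neg_one_cons (p : Int × Int) (r : List (Int × Int)) :
    PySem.List.pyGet? (p :: r) (-1) = some ((p :: r).getLast (by simp)) := by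
  simp [pysem]
  exact (List.getLast_eq_getElem (l := p :: r) (by simp)).symm

-- A's indexed middle loop + tail slice, expressed over List.range, is pvCore
lemma aux_A (cs : List Char) (rest : List (Int × Int)) : ∀ (p : Int × Int),
    (List.range rest.length).flatMap
        (fun j => PySem.List.slice cs (some ((p :: rest).getD j (0, 0)).2)
            (some (((p :: rest).getD (j + 1) (0, 0)).1 - 1)))
      ++ PySem.List.slice cs (some (((p :: rest).getLast (by simp)).2)) none
    = pvCore cs p.2 rest := by
  induction rest with
  | nil => intro p; simp [pvCore, slice_to_length]
  | cons q r ih =>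
    intro p
    rw [show (q :: r).length = r.length + 1 from rfl, List.range_succ_eq_map]
    simp only [List.flatMap_cons, List.flatMap_map, List.getD_cons_zero, List.getD_cons_succ,
      List.append_assoc]
    rw [pvCore]
    congr 1
    simpa [List.getD] using ih q

-- B's pairing of the boundary table from e onwards is pvCore
lemma pairB_tail (cs : List Char) (rest : List (Int × Int)) : ∀ (e : Int),
    ((pvPairB (e :: rest.foldr (fun q acc => (q.1 - 1) :: q.2 :: acc) [(cs.length : Int)])).map
        (fun q => PySem.List.slice cs (some q.1) (some q.2))).flatten
    = pvCore cs e rest := by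
  induction rest with
  | nil => intro e; simp [pvPairB, pvCore]
  | cons q r ih =>
    intro e
    simp only [List.foldr_cons, pvPairB, List.map_cons, List.flatten_cons]
    rw [pvCore]
    congr 1
    exact ih q.2

-- A's foldl over pyRange, as a flatMap over List.range on Nat indices
lemma A_loop (cs : List Char) (p : Int × Int) (rest : List (Int × Int)) (init : List Char) :
    (PySem.List.pyRange 0 (((p :: rest).length : Int) - 1) 1).foldl
        (fun acc i =>
          acc ++ PySem.List.slice cs (some (PySem.List.pyGetD (p :: rest) i ((0 : Int), (0 : Int))).2)
              (some ((PySem.List.pyGetD (p :: rest) (i + 1) ((0 : Int), (0 : Int))).1 - 1)))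
        init
    = init ++ (List.range rest.length).flatMap
        (fun j => PySem.List.slice cs (some ((p :: rest).getD j (0, 0)).2)
            (some (((p :: rest).getD (j + 1) (0, 0)).1 - 1))) := by
  rw [PySem.List.foldl_append_eq_flatMap]
  congr 1
  have h : ((p :: rest).length : Int) - 1 = ((rest.length : Nat) : Int) := by simp
  rw [h, PySem.List.pyRange_zero_nat, List.flatMap_map]
  apply List.flatMap_congr
  intro x hx
  have h2 : PySem.List.pyGetD (p :: rest) ((x : Int) + 1) (0, 0) = rest.getD x (0, 0) := by
    have hc : ((x : Int) + 1) = ((x + 1 : Nat) : Int) := by push_cast; ring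
    rw [hc, PySem.List.pyGetD_natCast]
    simp [List.getD]
  rw [h2]
  simp [List.getD]

-- B unfolded: head slice plus pvCore
lemma B_eq (s : String) (p : Int × Int) (rest : List (Int × Int)) :
    get_nonTM_seq_using_nested_TM_indices_alt s (p :: rest)
    = String.ofList (PySem.List.slice s.toList (some 0) (some (p.1 - 1)) ++ pvCore s.toList p.2 rest) := by
  unfold get_nonTM_seq_using_nested_TM_indices_alt
  dsimp only
  rw [join_nil_eq_flatten]
  congr 1
  simp only [List.foldr_cons, pvPairB, List.map_cons, List.flatten_cons]
  congr 1
  exact pairB_tail s.toList rest p.2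

-- ===== VERDICT (by name: the statement is the Claim_ definition above) =====
theorem get_nonTM_seq_using_nested_TM_indices_spec : Claim_equal_get_nonTM_seq_using_nested_TM_indices := by
  intro s t _hdom hpre
  unfold Spec_get_nonTM_seq_using_nested_TM_indices
  match t with
  | [] => exact absurd rfl hpre
  | p :: rest =>
    rw [B_eq]
    unfold get_nonTM_seq_using_nested_TM_indices
    rw [pyGet?_zero_cons, pyGet?_neg_one_cons]
    simp only []
    cases rest with
    | nil =>
      simp only [List.length_cons, List.length_nil, List.getLast_singleton]
      norm_num
      rw [pvCore, slice_to_length]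
    | cons q r =>
      have hgt : (p :: q :: r).length > 1 := by simp
      simp only [if_pos hgt]
      rw [A_loop, List.append_assoc, aux_A]
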